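-- pv_equiv track=rewrite | github.com/fyk943749465/LLeetCode | leetcode1700/leetcode1652.py | decrypt2
-- ===== SOURCE A (Python) =====
-- from typing import List
--
-- def decrypt2(code: List[int], k: int) -> List[int]:
--     n = len(code)
--     r = k + 1 if k >0 else n # 第一个窗口的右开断点
--     k = abs(k)
--     s = sum(code[r-k: r])    # 第一个窗口的元素和
--
--     ans = [0] * len(code)
--     for i in range(n):
--         ans[i] = s
--         s += code[r%n] - code[(r-k)%n]
--         r += 1
--     return ans
-- ===== SOURCE B (Python) =====
-- from typing import List
--
-- def decrypt2(code: List[int], k: int) -> List[int]: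
--     n = len(code)
--     kk = abs(k)
--     r = k + 1 if k > 0 else n
--     first = sum(code[r - kk: r])
--     return [first
--             + sum(code[(r + t) % n] - code[(r - kk + t) % n] for t in range(i))
--             for i in range(n)]
-- ===== Notes on version B (the rewrite author's own statement) =====
-- stated objective: alternative
-- what changed: Replaces A's single-pass stateful sliding window (running sum and rotating index mutated across the loop, answers written into a preallocated array) with a stateless per-index closed formula: each output i is computed independently as the first-window sum plus the partial sum of the i boundary differences, built by a comprehension with nested sums.
import Mathlib
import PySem

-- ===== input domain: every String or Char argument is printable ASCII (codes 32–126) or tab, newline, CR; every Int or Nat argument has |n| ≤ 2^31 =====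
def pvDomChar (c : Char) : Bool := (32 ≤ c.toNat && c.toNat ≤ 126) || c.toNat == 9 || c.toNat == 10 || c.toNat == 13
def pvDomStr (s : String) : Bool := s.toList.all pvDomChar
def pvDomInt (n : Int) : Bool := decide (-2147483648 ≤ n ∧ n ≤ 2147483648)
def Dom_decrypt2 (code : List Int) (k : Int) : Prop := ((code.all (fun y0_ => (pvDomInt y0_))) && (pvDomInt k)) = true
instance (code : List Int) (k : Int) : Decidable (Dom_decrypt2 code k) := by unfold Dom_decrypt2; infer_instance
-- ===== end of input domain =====

-- B replaces A's stateful sliding-window pass by a stateless per-index formula (first-window sum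
-- plus a partial sum of boundary differences); alternative structure, not faster.

-- ===== PORT A =====
-- literal port of A: running sum s, rotating right boundary r, answers set in place
def decrypt2 (code : List Int) (k : Int) : List Int :=
  let n : Int := (code.length : Int)
  let r : Int := if k > 0 then k + 1 else n
  let k' : Int := |k|
  let s : Int := (PySem.List.slice code (some (r - k')) (some r)).sum
  let ans : List Int := List.replicate code.length 0
  ((PySem.List.pyRange 0 n 1).foldl
    (fun (st : List Int × Int × Int) (i : Int) =>
      (PySem.List.pySetD st.1 i st.2.1,
       st.2.1 + PySem.List.pyGetD code (PySem.Int.mod st.2.2 n) 0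
              - PySem.List.pyGetD code (PySem.Int.mod (st.2.2 - k') n) 0,
       st.2.2 + 1)) (ans, s, r)).1

-- ===== PORT B =====
-- literal port of Source B: comprehension; each entry recomputed independently
def decrypt2_alt (code : List Int) (k : Int) : List Int :=
  let n : Int := (code.length : Int)
  let kk : Int := |k|
  let r : Int := if k > 0 then k + 1 else n
  let first : Int := (PySem.List.slice code (some (r - kk)) (some r)).sum
  (PySem.List.pyRange 0 n 1).map (fun (i : Int) =>
    first + ((PySem.List.pyRange 0 i 1).map (fun (t : Int) =>
      PySem.List.pyGetD code (PySem.Int.mod (r + t) n) 0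
      - PySem.List.pyGetD code (PySem.Int.mod (r - kk + t) n) 0)).sum)

-- ===== PRECONDITION & SPEC =====
def Spec_decrypt2 (code : List Int) (k : Int) (out : List Int) : Prop := out = decrypt2_alt code k
instance (code : List Int) (k : Int) (out : List Int) : Decidable (Spec_decrypt2 code k out) := by unfold Spec_decrypt2; infer_instance

-- ===== CLAIM (what is proved, stated in full; the proofs are below) =====
def Claim_equal_decrypt2 : Prop := ∀ (code : List Int) (k : Int), Dom_decrypt2 code k → Spec_decrypt2 code k (decrypt2 code k)

-- ===== LEMMAS AND PROOFS =====

-- setting index j of a mapped range rewrites the mapped function at j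
theorem set_map_range {f : Nat → Int} {N j : Nat} (_hj : j < N) (v : Int) :
    ((List.range N).map f).set j v
      = (List.range N).map (fun i => if i = j then v else f i) := by
  apply List.ext_getElem
  · simp
  · intro i h1 h2
    simp only [List.getElem_set, List.getElem_map, List.getElem_range]
    rcases eq_or_ne j i with h | h
    · simp [h]
    · rw [if_neg h, if_neg (Ne.symm h)]

-- A's loop invariant: after folding the first j indices, the state is
-- (answers F 0 .. F (j-1) written, F j, r + j), where F i = first + Σ_{t<i} d t
theorem foldA_invariant (code : List Int) (n r k' : Int) (first : Int) (N : Nat)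
    (j : Nat) (hj : j ≤ N) :
    (List.range j).foldl
      (fun (st : List Int × Int × Int) (i : Nat) =>
        (PySem.List.pySetD st.1 ((i : Nat) : Int) st.2.1,
         st.2.1 + PySem.List.pyGetD code (PySem.Int.mod st.2.2 n) 0
                - PySem.List.pyGetD code (PySem.Int.mod (st.2.2 - k') n) 0,
         st.2.2 + 1))
      ((List.range N).map (fun _ => (0 : Int)), first, r)
    = ((List.range N).map (fun i =>
          if i < j then
            first + ((List.range i).map (fun (t : Nat) =>
              PySem.List.pyGetD code (PySem.Int.mod (r + (t : Int)) n) 0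
              - PySem.List.pyGetD code (PySem.Int.mod (r - k' + (t : Int)) n) 0)).sum
          else 0),
        first + ((List.range j).map (fun (t : Nat) =>
          PySem.List.pyGetD code (PySem.Int.mod (r + (t : Int)) n) 0
          - PySem.List.pyGetD code (PySem.Int.mod (r - k' + (t : Int)) n) 0)).sum,
        r + (j : Int)) := by
  induction j with
  | zero => simp
  | succ j ih =>
    have hjN : j < N := Nat.lt_of_succ_le hj
    rw [List.range_succ, List.foldl_append, ih (Nat.le_of_lt hjN)]
    simp only [List.foldl_cons, List.foldl_nil, Prod.mk.injEq]
    refine ⟨?_, ?_, ?_⟩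
    · -- answers component
      rw [PySem.List.pySetD_natCast, set_map_range hjN]
      apply List.map_congr_left
      intro i _
      rcases eq_or_ne i j with h | h
      · subst h; simp
      · have hlt : i < j + 1 ↔ i < j := by omega
        simp [h, hlt]
    · -- running sum component
      rw [List.map_append, List.sum_append]
      have harg : r + (j : Int) - k' = r - k' + (j : Int) := by ring
      rw [harg]
      simp only [List.map_cons, List.map_nil, List.sum_cons, List.sum_nil]
      ring
    · -- right boundary component
      push_cast; ring

-- ===== VERDICT (by name: the statement is the Claim_ definition above) =====
theorem decrypt2_spec : Claim_equal_decrypt2 := by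
  intro code k _
  unfold Spec_decrypt2
  simp only [decrypt2, decrypt2_alt]
  have hrange : ∀ (m : Nat), PySem.List.pyRange 0 (m : Int) 1
      = (List.range m).map (fun (i : Nat) => (i : Int)) := by
    intro m
    rw [PySem.List.pyRange_one]
    simp
  rw [hrange code.length, List.foldl_map]
  have hrepl : List.replicate code.length (0 : Int)
      = (List.range code.length).map (fun _ => (0 : Int)) := by
    simp [List.map_const']
  rw [hrepl,
    foldA_invariant code (code.length : Int)
      (if k > 0 then k + 1 else (code.length : Int)) |k|
      ((PySem.List.slice code (some ((if k > 0 then k + 1 else (code.length : Int)) - |k|))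
        (some (if k > 0 then k + 1 else (code.length : Int)))).sum)
      code.length code.length (le_refl _)]
  rw [List.map_map]
  apply List.map_congr_left
  intro i hi
  have hiN : i < code.length := List.mem_range.mp hi
  simp only [Function.comp_apply, hiN, if_pos, hrange i, List.map_map]
  rfl
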